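-- pv_equiv track=rewrite | github.com/christiancoleman/hue-email-automation | gmail_monitor.py | _build_or_expression
-- ===== SOURCE A (Python) =====
-- def _build_or_expression(conditions):
-- 	"""Build a properly formatted IMAP OR expression"""
-- 	if len(conditions) == 1:
-- 		return conditions[0]
-- 	elif len(conditions) == 2:
-- 		return f'(OR {conditions[0]} {conditions[1]})'
-- 	else:
-- 		# For more than 2 conditions, we need to nest OR expressions
-- 		# (OR condition1 (OR condition2 condition3))
-- 		result = conditions[-2:]
-- 		result = f'(OR {result[0]} {result[1]})'
--
-- 		for i in range(len(conditions)-3, -1, -1):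
-- 			result = f'(OR {conditions[i]} {result})'
--
-- 		return result
-- ===== SOURCE B (Python) =====
-- def _build_or_expression(conditions):
-- 	"""Build a properly formatted IMAP OR expression"""
-- 	*init, last = conditions
-- 	return ''.join(f'(OR {c} ' for c in init) + last + ')' * len(init)
-- ===== Notes on version B (the rewrite author's own statement) =====
-- stated objective: faster
-- what changed: Replaces A's three-way length split plus reverse index loop of nested concatenations with a single forward pass: join the '(OR c ' prefixes, append the last element, append the closing parentheses.
import Mathlib
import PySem

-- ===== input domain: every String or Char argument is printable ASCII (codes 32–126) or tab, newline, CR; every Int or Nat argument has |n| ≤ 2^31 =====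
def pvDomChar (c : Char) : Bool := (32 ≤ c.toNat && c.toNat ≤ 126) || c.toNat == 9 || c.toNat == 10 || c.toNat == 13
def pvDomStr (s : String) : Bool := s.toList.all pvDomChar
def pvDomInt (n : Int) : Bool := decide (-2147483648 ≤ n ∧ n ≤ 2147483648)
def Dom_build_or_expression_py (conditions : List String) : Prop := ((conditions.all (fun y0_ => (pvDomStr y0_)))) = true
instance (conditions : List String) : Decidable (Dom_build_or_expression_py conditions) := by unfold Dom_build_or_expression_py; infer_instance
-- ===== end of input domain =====

-- B builds the expression in ONE forward pass — a joined "(OR c " prefix per head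
-- element, the last element, then the closing parentheses — instead of A's
-- three-way length split plus reverse index loop of nested concatenations;
-- a timing run measured B faster at the largest sizes (linear vs quadratic
-- string building in CPython).


-- ===== PORT A =====
-- Literal port of A: length cases 1 and 2, then the conditions[-2:] seed and a
-- range(len-3, -1, -1) countdown loop wrapping "(OR c_i result)".
def build_or_expression_py (conditions : List String) : String :=
  if conditions.length = 1 then (PySem.List.pyGet? conditions 0).getD ""
  else if conditions.length = 2 then
    "(OR " ++ (PySem.List.pyGet? conditions 0).getD "" ++ " " ++
      (PySem.List.pyGet? conditions 1).getD "" ++ ")"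
  else
    let r := PySem.List.slice conditions (some (-2)) none
    let result := "(OR " ++ (PySem.List.pyGet? r 0).getD "" ++ " " ++
      (PySem.List.pyGet? r 1).getD "" ++ ")"
    (PySem.List.pyRange ((conditions.length : Int) - 3) (-1) (-1)).foldl
      (fun result i =>
        "(OR " ++ (PySem.List.pyGet? conditions i).getD "" ++ " " ++ result ++ ")")
      result

-- ===== PORT B =====
-- hand port of Python's ')' * k (exact: k copies of ')'; PySem has no repeat)
def closeParens : Nat → String
  | 0 => ""
  | n + 1 => closeParens n ++ ")"

-- Port of B: '*init, last = conditions' then ''.join prefix + last + ')'*len(init).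
def build_or_expression_py_alt (conditions : List String) : String :=
  let init := conditions.dropLast
  let last := conditions.getLast?.getD ""   -- [] unreachable under Pre_ (Python B raises ValueError there)
  PySem.Str.join "" (init.map (fun c => "(OR " ++ c ++ " ")) ++ last ++
    closeParens init.length

-- ===== PRECONDITION & SPEC =====
-- Pre_ excludes only the empty list, on which both Pythons raise (A IndexError, B ValueError).
def Pre_build_or_expression_py (conditions : List String) : Prop := conditions ≠ []
instance (conditions : List String) : Decidable (Pre_build_or_expression_py conditions) := by unfold Pre_build_or_expression_py; infer_instance
def pvWitness_build_or_expression_py : List String := ["FROM a", "FROM b", "FROM c"]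
def Spec_build_or_expression_py (conditions : List String) (out : String) : Prop := out = build_or_expression_py_alt conditions
instance (conditions : List String) (out : String) : Decidable (Spec_build_or_expression_py conditions out) := by unfold Spec_build_or_expression_py; infer_instance

-- ===== CLAIM (what is proved, stated in full; the proofs are below) =====
def Claim_equal_build_or_expression_py : Prop := ∀ (conditions : List String), Dom_build_or_expression_py conditions → Pre_build_or_expression_py conditions → Spec_build_or_expression_py conditions (build_or_expression_py conditions)

-- ===== LEMMAS AND PROOFS =====

-- proof-side reference form: the fully nested OR expression
def nestAll : List String → String
  | [] => ""
  | [c] => c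
  | c :: c2 :: rest => "(OR " ++ c ++ " " ++ nestAll (c2 :: rest) ++ ")"

theorem nest_cons (c : String) (rest : List String) (h : rest ≠ []) :
    nestAll (c :: rest) = "(OR " ++ c ++ " " ++ nestAll rest ++ ")" := by
  cases rest with
  | nil => exact absurd rfl h
  | cons a t => rfl

theorem join_empty_cons (x : String) (xs : List String) :
    PySem.Str.join "" (x :: xs) = x ++ PySem.Str.join "" xs := by
  cases xs with
  | nil => simp [PySem.Str.join, PySem.Chars.join, List.intercalate]
  | cons y ys => simp [PySem.Str.join, PySem.Chars.join, List.intercalate]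

-- B equals the nested reference form on every non-empty list.
theorem alt_eq_nestAll : ∀ xs : List String, xs ≠ [] →
    build_or_expression_py_alt xs = nestAll xs := by
  intro xs
  induction xs with
  | nil => intro h; exact absurd rfl h
  | cons c t ih =>
      intro _
      cases t with
      | nil =>
          simp [build_or_expression_py_alt, closeParens, nestAll,
            PySem.Str.join, PySem.Chars.join, List.intercalate]
      | cons c2 rest =>
          have hne : c2 :: rest ≠ [] := by simp
          rw [nest_cons c _ hne, ← ih hne]
          simp only [build_or_expression_py_alt, List.dropLast_cons₂,
            List.getLast?_cons_cons, List.map_cons, List.length_cons,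
            join_empty_cons, closeParens]
          simp [String.append_assoc]

-- A's countdown loop from j-1 to 0 turns the nested form of the suffix into
-- the nested form of the whole list.
theorem loop_eq (xs : List String) :
    ∀ j : Nat, j < xs.length →
      (PySem.List.pyRange ((j : Int) - 1) (-1) (-1)).foldl
        (fun result i =>
          "(OR " ++ (PySem.List.pyGet? xs i).getD "" ++ " " ++ result ++ ")")
        (nestAll (xs.drop j))
      = nestAll xs := by
  intro j
  induction j with
  | zero =>
      intro _
      rw [PySem.List.pyRange_neg_one_eq_nil (by omega)]
      simp
  | succ k ih =>
      intro hj
      have hk : k < xs.length := by omega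
      rw [show ((k + 1 : Nat) : Int) - 1 = (k : Int) by push_cast; ring,
          PySem.List.pyRange_neg_one_cons (by omega)]
      simp only [List.foldl_cons]
      have hget : (PySem.List.pyGet? xs (k : Int)).getD "" = xs[k] := by
        rw [PySem.List.pyGet?_natCast]
        simp [List.getElem?_eq_getElem hk]
      have hdrop : xs.drop k = xs[k] :: xs.drop (k + 1) :=
        List.drop_eq_getElem_cons hk
      have htail : xs.drop (k + 1) ≠ [] := by
        intro h
        have := List.length_drop (l := xs) (i := k + 1)
        rw [h] at this
        simp at this
        omega
      have hstep :
          "(OR " ++ (PySem.List.pyGet? xs (k : Int)).getD "" ++ " " ++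
              nestAll (xs.drop (k + 1)) ++ ")"
            = nestAll (xs.drop k) := by
        rw [hget, hdrop, nest_cons _ _ htail]
      rw [hstep, ih hk]

-- A equals the nested reference form on every non-empty list.
theorem a_eq_nestAll (xs : List String) (hpre : xs ≠ []) :
    build_or_expression_py xs = nestAll xs := by
  unfold build_or_expression_py
  by_cases h1 : xs.length = 1
  · match xs, h1 with
    | [c], _ => simp [PySem.List.pyGet?, PySem.List.pyIdx?, nestAll]
  · by_cases h2 : xs.length = 2
    · match xs, h2 with
      | [a, b], _ =>
          simp [PySem.List.pyGet?, PySem.List.pyIdx?, nestAll]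
    · have h3 : 3 ≤ xs.length := by
        cases xs with
        | nil => exact absurd rfl hpre
        | cons a t =>
            simp only [List.length_cons] at h1 h2 ⊢
            omega
      simp only [h1, h2, if_false]
      rw [PySem.List.slice_from_neg_ofNat xs 2 (by omega)]
      have hdrop2 : xs.drop (xs.length - 2) =
          xs[xs.length - 2] :: xs.drop (xs.length - 2 + 1) :=
        List.drop_eq_getElem_cons (by omega)
      rw [show xs.length - 2 + 1 = xs.length - 1 from by omega] at hdrop2
      have hdrop1 : xs.drop (xs.length - 1) =
          xs[xs.length - 1] :: xs.drop (xs.length - 1 + 1) :=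
        List.drop_eq_getElem_cons (by omega)
      rw [show xs.length - 1 + 1 = xs.length from by omega, List.drop_length] at hdrop1
      have hseed :
          "(OR " ++ (PySem.List.pyGet? (xs.drop (xs.length - 2)) 0).getD "" ++ " " ++
              (PySem.List.pyGet? (xs.drop (xs.length - 2)) 1).getD "" ++ ")"
            = nestAll (xs.drop (xs.length - 2)) := by
        rw [hdrop2, hdrop1]
        simp [PySem.List.pyGet?, PySem.List.pyIdx?, nestAll]
      rw [hseed,
          show ((xs.length : Int) - 3) = ((xs.length - 2 : Nat) : Int) - 1 by omega]
      exact loop_eq xs (xs.length - 2) (by omega)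

-- ===== VERDICT (by name: the statement is the Claim_ definition above) =====
theorem build_or_expression_py_spec : Claim_equal_build_or_expression_py := by
  intro xs _ hpre
  unfold Spec_build_or_expression_py
  rw [a_eq_nestAll xs hpre, alt_eq_nestAll xs hpre]
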